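-- pv_equiv track=rewrite | github.com/ralborta/conciliador-ia | conciliador_ia/services/cliente_processor_inteligente.py | _es_archivo_portal_afip
-- ===== SOURCE A (Python) =====
-- from typing import Dict, List, Any, Optional
--
-- def _es_archivo_portal_afip(columnas_lower: List[str]) -> bool:
--     """Detecta si es archivo del Portal AFIP"""
--     patrones_portal = [
--         'tipo doc', 'tipo_doc', 'tipo documento',
--         'numero doc', 'numero_doc', 'numero documento',
--         'denominacion', 'razon social', 'comprador'
--     ]
--
--     coincidencias = sum(1 for patron in patrones_portal
--                       if any(patron in col for col in columnas_lower))
--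
--     return coincidencias >= 3  # Al menos 3 patrones deben coincidir
-- ===== SOURCE B (Python) =====
-- def _es_archivo_portal_afip(columnas_lower):
--     """Detecta si es archivo del Portal AFIP"""
--     patrones_portal = [
--         'tipo doc', 'tipo_doc', 'tipo documento',
--         'numero doc', 'numero_doc', 'numero documento',
--         'denominacion', 'razon social', 'comprador'
--     ]
--     # Naive multi-pattern positional matching: scan every offset of each
--     # column once and test all patterns at that offset with startswith,
--     # accumulating the matched patterns in a set.
--     matched = set()
--     for col in columnas_lower:
--         for i in range(len(col) + 1):
--             for patron in patrones_portal:
--                 if col.startswith(patron, i):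
--                     matched.add(patron)
--     return len(matched) >= 3
-- ===== Notes on version B (the rewrite author's own statement) =====
-- stated objective: alternative
-- what changed: Replaces A's per-pattern existential substring tests ('patron in col' under any/sum) by a naive multi-pattern positional matcher: one scan over every character offset of each column, testing all nine patterns at each offset with startswith and accumulating the matched patterns in a set whose size is compared with 3.
import Mathlib
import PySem

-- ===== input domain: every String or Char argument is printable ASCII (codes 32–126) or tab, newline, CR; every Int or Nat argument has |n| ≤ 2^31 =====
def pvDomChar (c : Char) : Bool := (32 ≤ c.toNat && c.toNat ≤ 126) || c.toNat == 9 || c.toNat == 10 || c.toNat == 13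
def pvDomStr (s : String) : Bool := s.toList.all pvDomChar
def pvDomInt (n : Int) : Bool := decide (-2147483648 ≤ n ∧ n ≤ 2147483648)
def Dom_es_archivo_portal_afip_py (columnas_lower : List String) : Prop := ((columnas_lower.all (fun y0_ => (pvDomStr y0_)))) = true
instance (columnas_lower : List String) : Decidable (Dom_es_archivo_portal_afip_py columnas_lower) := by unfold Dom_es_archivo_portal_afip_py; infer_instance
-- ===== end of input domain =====

-- B replaces A's per-pattern existential substring tests by a naive multi-pattern
-- positional matcher: one scan over each column's offsets, testing every pattern at
-- each offset with startswith, accumulating matched patterns in a set (alternative).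


-- the fixed pattern list shared by both programs (identical literal in A and B)
def patronesPortal : List String :=
  ["tipo doc", "tipo_doc", "tipo documento",
   "numero doc", "numero_doc", "numero documento",
   "denominacion", "razon social", "comprador"]

-- ===== PORT A =====
-- sum(1 for patron in patrones_portal if any(patron in col for col in columnas_lower)) >= 3
def es_archivo_portal_afip_py (columnas_lower : List String) : Bool :=
  let coincidencias :=
    patronesPortal.foldl
      (fun acc patron =>
        if columnas_lower.any (fun col => PySem.Str.isIn patron col) then acc + 1 else acc)
      (0 : Nat)
  decide (3 ≤ coincidencias)

-- ===== PORT B =====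
-- for col: for i in range(len(col)+1): for patron: if col.startswith(patron, i): matched.add(patron)
-- col.startswith(patron, i) with 0 ≤ i (as every i drawn from range is) is exactly
-- patron.toList <+: col.toList.drop i.toNat, i.e. PySem.Chars.startswith on the dropped list.
def es_archivo_portal_afip_py_alt (columnas_lower : List String) : Bool :=
  let matched : PySem.Set String :=
    columnas_lower.foldl
      (fun s col =>
        (PySem.List.pyRange 0 (PySem.Str.len col + 1) 1).foldl
          (fun s i =>
            patronesPortal.foldl
              (fun s patron =>
                if PySem.Chars.startswith (col.toList.drop i.toNat) patron.toList
                then PySem.Set.add s patron else s)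
              s)
          s)
      PySem.Set.empty
  decide (3 ≤ matched.length)

-- ===== PRECONDITION & SPEC =====
def Spec_es_archivo_portal_afip_py (columnas_lower : List String) (out : Bool) : Prop := out = es_archivo_portal_afip_py_alt columnas_lower
instance (columnas_lower : List String) (out : Bool) : Decidable (Spec_es_archivo_portal_afip_py columnas_lower out) := by unfold Spec_es_archivo_portal_afip_py; infer_instance

-- ===== CLAIM =====
def Claim_equal_es_archivo_portal_afip_py : Prop := ∀ (columnas_lower : List String), Dom_es_archivo_portal_afip_py columnas_lower → Spec_es_archivo_portal_afip_py columnas_lower (es_archivo_portal_afip_py columnas_lower)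

-- ===== LEMMAS AND PROOFS =====

-- A's counting fold is countP of the existential predicate
theorem foldl_count_eq (l : List String) (pred : String → Bool) (acc : Nat) :
    l.foldl (fun acc p => if pred p then acc + 1 else acc) acc = acc + l.countP pred := by
  induction l generalizing acc with
  | nil => simp
  | cons x xs ih =>
    simp only [List.foldl_cons, List.countP_cons, ih]
    by_cases h : pred x = true
    · simp [h]; omega
    · simp [h]

-- generic: a fold that conditionally Set.add's elements of l — membership
theorem fold_add_mem (pred : String → Bool) (l : List String) (s : PySem.Set String) (p : String) :
    p ∈ l.foldl (fun s q => if pred q then PySem.Set.add s q else s) s ↔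
      p ∈ s ∨ (p ∈ l ∧ pred p = true) := by
  induction l generalizing s with
  | nil => simp
  | cons x xs ih =>
    simp only [List.foldl_cons, List.mem_cons]
    by_cases h : pred x = true
    · rw [if_pos h, ih]
      constructor
      · rintro (hs | ⟨hm, hc⟩)
        · rcases (PySem.Set.mem_add _ _ _).1 hs with hs' | rfl
          · exact Or.inl hs'
          · exact Or.inr ⟨Or.inl rfl, h⟩
        · exact Or.inr ⟨Or.inr hm, hc⟩
      · rintro (hs | ⟨(rfl | hm), hc⟩)
        · exact Or.inl ((PySem.Set.mem_add _ _ _).2 (Or.inl hs))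
        · exact Or.inl ((PySem.Set.mem_add _ _ _).2 (Or.inr rfl))
        · exact Or.inr ⟨hm, hc⟩
    · rw [if_neg h, ih]
      constructor
      · rintro (hs | ⟨hm, hc⟩)
        · exact Or.inl hs
        · exact Or.inr ⟨Or.inr hm, hc⟩
      · rintro (hs | ⟨(rfl | hm), hc⟩)
        · exact Or.inl hs
        · exact absurd hc h
        · exact Or.inr ⟨hm, hc⟩

theorem fold_add_nodup (pred : String → Bool) (l : List String) (s : PySem.Set String)
    (h : s.Nodup) :
    (l.foldl (fun s q => if pred q then PySem.Set.add s q else s) s).Nodup := by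
  induction l generalizing s with
  | nil => exact h
  | cons x xs ih =>
    simp only [List.foldl_cons]
    by_cases hx : pred x = true
    · rw [if_pos hx]; exact ih _ (PySem.Set.nodup_add _ _ h)
    · rw [if_neg hx]; exact ih _ h

-- generic lift: folding a step whose membership adds "C x p" over a list
theorem fold_lift_mem {α : Type} (F : PySem.Set String → α → PySem.Set String)
    (C : α → String → Prop)
    (hF : ∀ s x p, p ∈ F s x ↔ p ∈ s ∨ C x p)
    (l : List α) (s : PySem.Set String) (p : String) :
    p ∈ l.foldl F s ↔ p ∈ s ∨ ∃ x ∈ l, C x p := by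
  induction l generalizing s with
  | nil => simp
  | cons x xs ih =>
    simp only [List.foldl_cons, ih, hF, List.mem_cons]
    constructor
    · rintro ((hs | hc) | ⟨y, hy, hcy⟩)
      · exact Or.inl hs
      · exact Or.inr ⟨x, Or.inl rfl, hc⟩
      · exact Or.inr ⟨y, Or.inr hy, hcy⟩
    · rintro (hs | ⟨y, (rfl | hy), hcy⟩)
      · exact Or.inl (Or.inl hs)
      · exact Or.inl (Or.inr hcy)
      · exact Or.inr ⟨y, hy, hcy⟩

theorem fold_lift_nodup {α : Type} (F : PySem.Set String → α → PySem.Set String)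
    (hF : ∀ s x, s.Nodup → (F s x).Nodup)
    (l : List α) (s : PySem.Set String) (h : s.Nodup) :
    (l.foldl F s).Nodup := by
  induction l generalizing s with
  | nil => exact h
  | cons x xs ih => exact ih _ (hF _ _ h)

-- the positional scan finds p in col iff p is a substring of col
theorem exists_offset_iff_isIn (p col : String) :
    (∃ i ∈ PySem.List.pyRange 0 (PySem.Str.len col + 1) 1,
        PySem.Chars.startswith (col.toList.drop i.toNat) p.toList = true) ↔
      PySem.Str.isIn p col = true := by
  rw [show PySem.Str.isIn p col = PySem.Chars.isIn p.toList col.toList from by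
        simp [PySem.Str.isIn]]
  rw [← PySem.Chars.exists_prefix_drop_iff_isIn]
  constructor
  · rintro ⟨i, _, hst⟩
    exact ⟨i.toNat, (PySem.Chars.startswith_iff _ _).1 hst⟩
  · rintro ⟨j, hj⟩
    by_cases hle : j ≤ col.toList.length
    · refine ⟨(j : Int), ?_, (PySem.Chars.startswith_iff _ _).2 (by simpa using hj)⟩
      rw [PySem.List.mem_pyRange_one]
      constructor
      · exact Int.natCast_nonneg j
      · have : col.toList.length = col.length := by simp
        simp only [PySem.Str.len]; omega
    · refine ⟨(col.toList.length : Int), ?_, (PySem.Chars.startswith_iff _ _).2 ?_⟩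
      · rw [PySem.List.mem_pyRange_one]
        constructor
        · exact Int.natCast_nonneg _
        · have : col.toList.length = col.length := by simp
          simp only [PySem.Str.len]; omega
      · have h1 : col.toList.drop j = [] := List.drop_eq_nil_of_le (by omega)
        have h2 : col.toList.drop (((col.toList.length : Int)).toNat) = [] := by
          simp
        rw [h2]; rw [h1] at hj; exact hj

-- B's middle fold (over offsets) for one column: membership
theorem mid_mem (col : String) (s : PySem.Set String) (q : String) :
    q ∈ (PySem.List.pyRange 0 (PySem.Str.len col + 1) 1).foldl
          (fun s i => patronesPortal.foldl
            (fun s patron => if PySem.Chars.startswith (col.toList.drop i.toNat) patron.toList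
              then PySem.Set.add s patron else s) s) s ↔
      q ∈ s ∨ (q ∈ patronesPortal ∧ PySem.Str.isIn q col = true) := by
  rw [fold_lift_mem
      (fun s i => patronesPortal.foldl
        (fun s patron => if PySem.Chars.startswith (col.toList.drop i.toNat) patron.toList
          then PySem.Set.add s patron else s) s)
      (fun (i : Int) q => q ∈ patronesPortal ∧
        PySem.Chars.startswith (col.toList.drop i.toNat) q.toList = true)
      (fun s i q => fold_add_mem
        (fun patron => PySem.Chars.startswith (col.toList.drop i.toNat) patron.toList)
        patronesPortal s q)]
  constructor
  · rintro (hs | ⟨i, hi, hq, hst⟩)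
    · exact Or.inl hs
    · exact Or.inr ⟨hq, (exists_offset_iff_isIn q col).1 ⟨i, hi, hst⟩⟩
  · rintro (hs | ⟨hq, hin⟩)
    · exact Or.inl hs
    · obtain ⟨i, hi, hst⟩ := (exists_offset_iff_isIn q col).2 hin
      exact Or.inr ⟨i, hi, hq, hst⟩

-- ===== VERDICT =====
theorem es_archivo_portal_afip_py_spec : Claim_equal_es_archivo_portal_afip_py := by
  intro cols _
  unfold Spec_es_archivo_portal_afip_py es_archivo_portal_afip_py es_archivo_portal_afip_py_alt
  simp only []
  congr 1
  rw [foldl_count_eq]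
  have hmem : ∀ p, p ∈ cols.foldl
      (fun s col =>
        (PySem.List.pyRange 0 (PySem.Str.len col + 1) 1).foldl
          (fun s i => patronesPortal.foldl
            (fun s patron => if PySem.Chars.startswith (col.toList.drop i.toNat) patron.toList
              then PySem.Set.add s patron else s) s) s)
      PySem.Set.empty ↔
      p ∈ patronesPortal ∧ ∃ col ∈ cols, PySem.Str.isIn p col = true := by
    intro p
    rw [fold_lift_mem _
        (fun col q => q ∈ patronesPortal ∧ PySem.Str.isIn q col = true)
        (fun s col q => mid_mem col s q)]
    simp [PySem.Set.empty]
    tauto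
  have hnodup : (cols.foldl
      (fun s col =>
        (PySem.List.pyRange 0 (PySem.Str.len col + 1) 1).foldl
          (fun s i => patronesPortal.foldl
            (fun s patron => if PySem.Chars.startswith (col.toList.drop i.toNat) patron.toList
              then PySem.Set.add s patron else s) s) s)
      PySem.Set.empty).Nodup :=
    fold_lift_nodup _ (fun s col hs =>
      fold_lift_nodup _ (fun s i hs =>
        fold_add_nodup _ _ _ hs) _ _ hs) _ _ (by simp [PySem.Set.empty])
  have hperm :
      (cols.foldl
        (fun s col =>
          (PySem.List.pyRange 0 (PySem.Str.len col + 1) 1).foldl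
            (fun s i => patronesPortal.foldl
              (fun s patron => if PySem.Chars.startswith (col.toList.drop i.toNat) patron.toList
                then PySem.Set.add s patron else s) s) s)
        PySem.Set.empty).Perm
      (patronesPortal.filter (fun p => cols.any (fun col => PySem.Str.isIn p col))) := by
    apply List.perm_of_nodup_nodup_toFinset_eq hnodup
    · exact List.Nodup.filter _ (by decide)
    · apply Finset.ext
      intro p
      simp only [List.mem_toFinset, List.mem_filter, hmem, List.any_eq_true]
  rw [hperm.length_eq, ← List.countP_eq_length_filter]
  simp
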